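-- pv_equiv track=rewrite | github.com/a-bit-thinker/2048 | terminal_2048.py | limited_empty_cells
-- ===== SOURCE A (Python) =====
-- from typing import Dict, List, Optional, Tuple
--
-- SIZE = 4
--
-- MAX_CHANCE_BRANCHES = 8
--
-- Board = List[List[int]]
--
-- def limited_empty_cells(board: Board, max_cells: int = MAX_CHANCE_BRANCHES) -> List[Tuple[int, int]]:
--     cells = [(r, c) for r in range(SIZE) for c in range(SIZE) if board[r][c] == 0]
--     if len(cells) <= max_cells:
--         return cells
--
--     # Prefer cells close to corners for stable board shaping.
--     def corner_distance(cell: Tuple[int, int]) -> Tuple[int, int, int]: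
--         r, c = cell
--         distance = min(
--             r + c,
--             r + (SIZE - 1 - c),
--             (SIZE - 1 - r) + c,
--             (SIZE - 1 - r) + (SIZE - 1 - c),
--         )
--         return (distance, r, c)
--
--     cells.sort(key=corner_distance)
--     return cells[:max_cells]
-- ===== SOURCE B (Python) =====
-- SIZE = 4
--
-- MAX_CHANCE_BRANCHES = 8
--
--
-- def limited_empty_cells(board, max_cells=MAX_CHANCE_BRANCHES):
--     cells = [(r, c) for r in range(SIZE) for c in range(SIZE) if board[r][c] == 0]
--     if len(cells) <= max_cells:
--         return cells
--
--     # Bucket by corner distance (0..SIZE-1); row-major iteration keeps each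
--     # bucket sorted by (r, c), so concatenation reproduces the (d, r, c) order.
--     buckets = ([], [], [], [])
--     for r, c in cells:
--         d = min(r + c, r + 3 - c, 3 - r + c, 6 - r - c)
--         buckets[d].append((r, c))
--     ordered = buckets[0] + buckets[1] + buckets[2] + buckets[3]
--     return ordered[:max_cells]
-- ===== Notes on version B (the rewrite author's own statement) =====
-- stated objective: alternative
-- what changed: Replaces the comparison sort on the (distance, r, c) key by a single bucket/counting pass: cells are distributed into one bucket per corner distance while still in row-major order, and the buckets are concatenated, reproducing the sort's tie-break by insertion order.
import Mathlib
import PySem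

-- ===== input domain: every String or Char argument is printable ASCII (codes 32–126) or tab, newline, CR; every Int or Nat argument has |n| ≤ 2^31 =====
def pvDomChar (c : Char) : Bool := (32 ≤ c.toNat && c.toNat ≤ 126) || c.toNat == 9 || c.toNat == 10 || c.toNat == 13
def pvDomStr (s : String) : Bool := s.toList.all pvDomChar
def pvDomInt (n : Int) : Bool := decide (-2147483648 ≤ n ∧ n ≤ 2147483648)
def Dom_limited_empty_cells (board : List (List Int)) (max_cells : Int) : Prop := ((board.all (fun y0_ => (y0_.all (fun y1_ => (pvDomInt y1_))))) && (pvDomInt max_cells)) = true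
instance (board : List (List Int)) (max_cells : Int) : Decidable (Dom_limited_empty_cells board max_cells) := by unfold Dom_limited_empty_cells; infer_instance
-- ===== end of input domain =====

-- B replaces A's comparison sort on the (distance, r, c) key by a bucket pass over the
-- corner distances (0..3), concatenating the buckets; same return value, different algorithm.


-- ===== PORT A =====
-- the cell comprehension '[(r, c) for r in range(SIZE) for c in range(SIZE) if board[r][c] == 0]'
-- (this source line is identical in A and in B, so both ports share this helper);
-- board[r][c] is ported with pyGetD — exact whenever the indices are in range, i.e. on Pre_ below
def pvCells (board : List (List Int)) : List (Int × Int) :=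
  (PySem.List.pyRange 0 4 1).flatMap (fun r =>
    ((PySem.List.pyRange 0 4 1).filter (fun c =>
      PySem.List.pyGetD (PySem.List.pyGetD board r []) c 1 == 0)).map (fun c => (r, c)))

-- corner_distance: the (distance, r, c) key tuple
def cornerKey (cell : Int × Int) : Int × Int × Int :=
  (min (min (min (cell.1 + cell.2) (cell.1 + (3 - cell.2))) ((3 - cell.1) + cell.2))
     ((3 - cell.1) + (3 - cell.2)), cell.1, cell.2)

-- Python's tuple '<' on the 3-tuple key, written out componentwise (lexicographic)
def tupLt3 (a b : Int × Int × Int) : Bool :=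
  a.1 < b.1 || (a.1 == b.1 && (a.2.1 < b.2.1 || (a.2.1 == b.2.1 && a.2.2 < b.2.2)))

-- cells.sort(key=corner_distance) is ported in PySem's stable-sort shape
-- (sorted_eq_foldl_insertBy), with the tuple key compared componentwise by tupLt3
def limited_empty_cells (board : List (List Int)) (max_cells : Int) : List (Int × Int) :=
  let cells := pvCells board
  if (cells.length : Int) ≤ max_cells then cells
  else
    PySem.List.slice
      (cells.foldl (fun acc x =>
        PySem.List.insertBy (fun a b => tupLt3 (cornerKey a) (cornerKey b)) x acc) [])
      none (some max_cells)

-- ===== PORT B =====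
-- d = min(r + c, r + 3 - c, 3 - r + c, 6 - r - c)
def bucketDist (cell : Int × Int) : Int :=
  min (min (min (cell.1 + cell.2) (cell.1 + 3 - cell.2)) (3 - cell.1 + cell.2))
    (6 - cell.1 - cell.2)

-- buckets[d].append((r, c)) on the 4-tuple of buckets
def bucketStep (st : List (Int × Int) × List (Int × Int) × List (Int × Int) × List (Int × Int))
    (cell : Int × Int) :
    List (Int × Int) × List (Int × Int) × List (Int × Int) × List (Int × Int) :=
  if bucketDist cell = 0 then (st.1 ++ [cell], st.2.1, st.2.2.1, st.2.2.2)
  else if bucketDist cell = 1 then (st.1, st.2.1 ++ [cell], st.2.2.1, st.2.2.2)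
  else if bucketDist cell = 2 then (st.1, st.2.1, st.2.2.1 ++ [cell], st.2.2.2)
  else (st.1, st.2.1, st.2.2.1, st.2.2.2 ++ [cell])

def limited_empty_cells_alt (board : List (List Int)) (max_cells : Int) : List (Int × Int) :=
  let cells := pvCells board
  if (cells.length : Int) ≤ max_cells then cells
  else
    let st := cells.foldl bucketStep ([], [], [], [])
    PySem.List.slice (st.1 ++ st.2.1 ++ st.2.2.1 ++ st.2.2.2) none (some max_cells)

-- ===== PRECONDITION & SPEC =====
-- Pre_ excludes exactly the boards on which Python's board[r][c] (r, c in 0..3) raises IndexError: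
-- fewer than 4 rows, or one of the first 4 rows shorter than 4 entries
def Pre_limited_empty_cells (board : List (List Int)) (max_cells : Int) : Prop :=
  4 ≤ board.length ∧ ∀ row ∈ board.take 4, 4 ≤ row.length
instance (board : List (List Int)) (max_cells : Int) : Decidable (Pre_limited_empty_cells board max_cells) := by unfold Pre_limited_empty_cells; infer_instance

def pvWitness_limited_empty_cells : List (List Int) × Int :=
  ([[0, 0, 0, 2], [0, 4, 0, 0], [0, 0, 2, 0], [0, 0, 0, 0]], 8)

def Spec_limited_empty_cells (board : List (List Int)) (max_cells : Int) (out : List (Int × Int)) : Prop := out = limited_empty_cells_alt board max_cells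
instance (board : List (List Int)) (max_cells : Int) (out : List (Int × Int)) : Decidable (Spec_limited_empty_cells board max_cells out) := by unfold Spec_limited_empty_cells; infer_instance

-- ===== CLAIM (what is proved, stated in full; the proofs are below) =====
def Claim_equal_limited_empty_cells : Prop := ∀ (board : List (List Int)) (max_cells : Int), Dom_limited_empty_cells board max_cells → Pre_limited_empty_cells board max_cells → Spec_limited_empty_cells board max_cells (limited_empty_cells board max_cells)

-- ===== LEMMAS AND PROOFS =====

-- the 16 board positions, in row-major order
def allCells : List (Int × Int) :=
  [(0,0),(0,1),(0,2),(0,3),(1,0),(1,1),(1,2),(1,3),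
   (2,0),(2,1),(2,2),(2,3),(3,0),(3,1),(3,2),(3,3)]

-- row-major rank and a single Int encoding of the (distance, r, c) key
def pvRc (x : Int × Int) : Int := 4 * x.1 + x.2
def pvEnc (x : Int × Int) : Int := 16 * bucketDist x + pvRc x

theorem dist_cases : ∀ x ∈ allCells, bucketDist x = 0 ∨ bucketDist x = 1 ∨ bucketDist x = 2 := by decide

theorem lt_eq_enc : ∀ x ∈ allCells, ∀ y ∈ allCells,
    tupLt3 (cornerKey x) (cornerKey y) = decide (pvEnc x < pvEnc y) := by decide

theorem rc_bounds : ∀ x ∈ allCells, 0 ≤ pvRc x ∧ pvRc x < 16 := by decide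

theorem allCells_pairwise : allCells.Pairwise (fun a b => pvRc a < pvRc b) := by decide

theorem cells_sublist (board : List (List Int)) : (pvCells board).Sublist allCells := by
  have h4 : PySem.List.pyRange 0 4 1 = [0, 1, 2, 3] := by decide
  have chunk : ∀ (r : Int) (p : Int → Bool),
      ((([0,1,2,3] : List Int).filter p).map (fun c => (r, c))).Sublist
        (([0,1,2,3] : List Int).map (fun c => (r, c))) :=
    fun r p => (List.filter_sublist).map _
  show (pvCells board).Sublist
    ((([0,1,2,3] : List Int).map (fun c => ((0:Int), c))) ++
      ((([0,1,2,3] : List Int).map (fun c => ((1:Int), c))) ++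
        ((([0,1,2,3] : List Int).map (fun c => ((2:Int), c))) ++
          (([0,1,2,3] : List Int).map (fun c => ((3:Int), c))))))
  unfold pvCells
  rw [h4]
  simp only [List.flatMap_cons, List.flatMap_nil, List.append_nil]
  exact (chunk 0 _).append ((chunk 1 _).append ((chunk 2 _).append (chunk 3 _)))

theorem insertBy_congr (x : Int × Int) (hx : x ∈ allCells) :
    ∀ acc : List (Int × Int), (∀ y ∈ acc, y ∈ allCells) →
    PySem.List.insertBy (fun a b => tupLt3 (cornerKey a) (cornerKey b)) x acc =
      PySem.List.insertBy (fun a b => decide (pvEnc a < pvEnc b)) x acc := by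
  intro acc
  induction acc with
  | nil => intro _; rfl
  | cons y ys ih =>
    intro hmem
    have hy : y ∈ allCells := hmem y (by simp)
    simp only [PySem.List.insertBy, lt_eq_enc x hx y hy]
    split
    · rfl
    · rw [ih (fun z hz => hmem z (by simp [hz]))]

theorem foldl_insert_congr :
    ∀ cs : List (Int × Int), (∀ x ∈ cs, x ∈ allCells) →
    ∀ acc : List (Int × Int), (∀ y ∈ acc, y ∈ allCells) →
    cs.foldl (fun acc x =>
        PySem.List.insertBy (fun a b => tupLt3 (cornerKey a) (cornerKey b)) x acc) acc =
      cs.foldl (fun acc x =>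
        PySem.List.insertBy (fun a b => decide (pvEnc a < pvEnc b)) x acc) acc := by
  intro cs
  induction cs with
  | nil => intro _ acc _; rfl
  | cons x cs ih =>
    intro hcs acc hacc
    have hx : x ∈ allCells := hcs x (by simp)
    simp only [List.foldl_cons]
    rw [insertBy_congr x hx acc hacc]
    exact ih (fun z hz => hcs z (by simp [hz])) _
      (fun y hy => ((PySem.List.mem_insertBy _ x y acc).mp hy).elim
        (fun h => h ▸ hx) (fun h => hacc y h))

theorem bucket_char :
    ∀ cs : List (Int × Int), (∀ x ∈ cs, x ∈ allCells) →
    ∀ a0 a1 a2 a3 : List (Int × Int),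
    cs.foldl bucketStep (a0, a1, a2, a3) =
      (a0 ++ cs.filter (fun x => bucketDist x == 0),
       a1 ++ cs.filter (fun x => bucketDist x == 1),
       a2 ++ cs.filter (fun x => bucketDist x == 2), a3) := by
  intro cs
  induction cs with
  | nil => intro _ a0 a1 a2 a3; simp
  | cons x cs ih =>
    intro hcs a0 a1 a2 a3
    have hcs' : ∀ z ∈ cs, z ∈ allCells := fun z hz => hcs z (by simp [hz])
    rcases dist_cases x (hcs x (by simp)) with h | h | h <;>
      simp [bucketStep, h, ih hcs', List.append_assoc]

theorem perm3 :
    ∀ cs : List (Int × Int), (∀ x ∈ cs, x ∈ allCells) →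
    (cs.filter (fun x => bucketDist x == 0) ++ cs.filter (fun x => bucketDist x == 1) ++
      cs.filter (fun x => bucketDist x == 2)).Perm cs := by
  intro cs
  induction cs with
  | nil => intro _; simp
  | cons x cs ih =>
    intro hcs
    have hcs' : ∀ z ∈ cs, z ∈ allCells := fun z hz => hcs z (by simp [hz])
    rcases dist_cases x (hcs x (by simp)) with h | h | h
    · simpa [List.filter_cons, h] using (ih hcs').cons x
    · simp only [List.filter_cons, h]
      norm_num
      refine List.Perm.trans ?_ ((ih hcs').cons x)
      simp only [List.append_assoc]
      exact List.perm_middle (a := x)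
          (l₁ := cs.filter (fun x => bucketDist x == 0))
          (l₂ := cs.filter (fun x => bucketDist x == 1) ++
            cs.filter (fun x => bucketDist x == 2))
    · simp only [List.filter_cons, h]
      norm_num
      refine List.Perm.trans ?_ ((ih hcs').cons x)
      simpa [List.append_assoc] using
        (List.perm_middle (a := x)
          (l₁ := cs.filter (fun x => bucketDist x == 0) ++
            cs.filter (fun x => bucketDist x == 1))
          (l₂ := cs.filter (fun x => bucketDist x == 2)))

theorem filter_pairwise_enc (cs : List (Int × Int)) (hsub : cs.Sublist allCells) (i : Int) :
    (cs.filter (fun x => bucketDist x == i)).Pairwise (fun a b => pvEnc a < pvEnc b) := by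
  have hrc : (cs.filter (fun x => bucketDist x == i)).Pairwise (fun a b => pvRc a < pvRc b) :=
    List.Pairwise.sublist ((List.filter_sublist).trans hsub) allCells_pairwise
  refine hrc.imp_of_mem ?_
  intro a b ha hb hlt
  have hda : bucketDist a = i := by simpa using (List.of_mem_filter ha)
  have hdb : bucketDist b = i := by simpa using (List.of_mem_filter hb)
  simp only [pvEnc, hda, hdb]
  omega

theorem cross_enc (cs : List (Int × Int)) (hsub : cs.Sublist allCells) (i j : Int) (hij : i < j) :
    ∀ a ∈ cs.filter (fun x => bucketDist x == i), ∀ b ∈ cs.filter (fun x => bucketDist x == j),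
      pvEnc a < pvEnc b := by
  intro a ha b hb
  have hda : bucketDist a = i := by simpa using (List.of_mem_filter ha)
  have hdb : bucketDist b = j := by simpa using (List.of_mem_filter hb)
  have hba := rc_bounds a (hsub.subset ((List.filter_sublist).subset ha))
  have hbb := rc_bounds b (hsub.subset ((List.filter_sublist).subset hb))
  simp only [pvEnc, hda, hdb]
  omega

theorem pw3 (cs : List (Int × Int)) (hsub : cs.Sublist allCells) :
    (cs.filter (fun x => bucketDist x == 0) ++ cs.filter (fun x => bucketDist x == 1) ++
      cs.filter (fun x => bucketDist x == 2)).Pairwise (fun a b => pvEnc a < pvEnc b) := by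
  rw [List.pairwise_append, List.pairwise_append]
  refine ⟨⟨filter_pairwise_enc cs hsub 0, filter_pairwise_enc cs hsub 1,
    cross_enc cs hsub 0 1 (by norm_num)⟩, filter_pairwise_enc cs hsub 2, ?_⟩
  intro a ha b hb
  rcases List.mem_append.mp ha with h | h
  · exact cross_enc cs hsub 0 2 (by norm_num) a h b hb
  · exact cross_enc cs hsub 1 2 (by norm_num) a h b hb

theorem sort_eq_buckets (board : List (List Int)) :
    (pvCells board).foldl (fun acc x =>
        PySem.List.insertBy (fun a b => tupLt3 (cornerKey a) (cornerKey b)) x acc) [] =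
      (pvCells board).filter (fun x => bucketDist x == 0) ++
        (pvCells board).filter (fun x => bucketDist x == 1) ++
        (pvCells board).filter (fun x => bucketDist x == 2) := by
  have hsub := cells_sublist board
  have hmem : ∀ x ∈ pvCells board, x ∈ allCells := fun x hx => hsub.subset hx
  rw [foldl_insert_congr _ hmem [] (by simp)]
  rw [← PySem.List.sorted_eq_foldl_insertBy (pvCells board) pvEnc]
  exact PySem.List.sorted_eq_of_perm_of_pairwise_lt _ _ pvEnc (perm3 _ hmem) (pw3 _ hsub)

-- ===== VERDICT (by name: the statement is the Claim_ definition above) =====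
theorem limited_empty_cells_spec : Claim_equal_limited_empty_cells := by
  intro board max_cells _ _
  show limited_empty_cells board max_cells = limited_empty_cells_alt board max_cells
  unfold limited_empty_cells limited_empty_cells_alt
  by_cases h : ((pvCells board).length : Int) ≤ max_cells
  · simp [h]
  · simp only [h, if_false]
    rw [sort_eq_buckets board, bucket_char _ (fun x hx => (cells_sublist board).subset hx)]
    simp [List.append_assoc]
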